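-- pv_equiv track=rewrite | github.com/ChengangWang-Allspring/file_watcher | pm_watch/core/date_core.py | cnv_csharp_date_fmt
-- ===== SOURCE A (Python) =====
-- _FORMAT_MAP = (
--     ('yyyy', '%Y'), ('yyy', '%Y'), ('yy', '%y'), ('y', '%y'),
--     ('MMMM', '%B'), ('MMM', '%b'), ('MM', '%m'), ('M', '%#m'),
--     ('dddd', '%A'), ('ddd', '%a'), ('dd', '%d'), ('d', '%#d'),
--     ('HH', '%H'), ('H', '%#H'), ('hh', '%I'), ('h', '%#I'),
--     ('mm', '%M'), ('m', '%#M'), ('ss', '%S'), ('s', '%#S'),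
--     ('tt', '%p'), ('t', '%#p'), ('zzz', '%z'), ('zz', '%z'), ('z', '%#z')
-- )
--
-- def cnv_csharp_date_fmt(in_fmt):
--     """ convert .NET date format to Python strftime date format """
--
--     ofmt = ''
--     fmt = in_fmt
--     while fmt:
--         if fmt[0] == "'":
--             # literal text enclosed in ''
--             apos = fmt.find("'", 1)
--             if apos == -1:
--                 # Input format is broken.
--                 apos = len(fmt)
--             ofmt += fmt[1:apos].replace('%', '%%')
--             fmt = fmt[apos+1:]
--         elif fmt[0] == "\\":
--             # One escaped literal character.
--             # Note graceful behaviour when \ is the last character.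
--             ofmt += fmt[1:2].replace('%', '%%')
--             fmt = fmt[2:]
--         else:
--             # This loop could be done with a regex "(yyyy)|(yyy)|etc".
--             for intok, outtok in _FORMAT_MAP:
--                 if fmt.startswith(intok):
--                     ofmt += outtok
--                     fmt = fmt[len(intok):]
--                     break
--             else:
--                 # Hmmmm, what does C# do here?
--                 # What do *you* want to do here?
--                 # I'll just emit one character as literal text
--                 # and carry on. Alternative: raise an exception.
--                 ofmt += fmt[0].replace('%', '%%')
--                 fmt = fmt[1:]
--     return ofmt
-- ===== SOURCE B (Python) =====
-- # Run-length re-implementation: instead of scanning the 25-entry token list with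
-- # startswith at every position, measure the maximal run of the leading character
-- # and index a per-character table of outputs by the run length.
--
-- _TOKENS = {
--     'y': ('%y', '%y', '%Y', '%Y'),
--     'M': ('%#m', '%m', '%b', '%B'),
--     'd': ('%#d', '%d', '%a', '%A'),
--     'H': ('%#H', '%H'),
--     'h': ('%#I', '%I'),
--     'm': ('%#M', '%M'),
--     's': ('%#S', '%S'),
--     't': ('%#p', '%p'),
--     'z': ('%#z', '%z', '%z'),
-- }
--
-- def cnv_csharp_date_fmt(in_fmt):
--     """ convert .NET date format to Python strftime date format """
--     out = []
--     i, n = 0, len(in_fmt)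
--     while i < n:
--         c = in_fmt[i]
--         if c == "'":
--             j = in_fmt.find("'", i + 1)
--             if j == -1:
--                 j = n
--             out.append(in_fmt[i + 1:j].replace('%', '%%'))
--             i = j + 1
--         elif c == '\\':
--             out.append(in_fmt[i + 1:i + 2].replace('%', '%%'))
--             i += 2
--         elif c in _TOKENS:
--             toks = _TOKENS[c]
--             r = i + 1
--             while r < n and in_fmt[r] == c:
--                 r += 1
--             run = r - i
--             while run:
--                 k = min(run, len(toks))
--                 out.append(toks[k - 1])
--                 run -= k
--             i = r
--         else:
--             out.append('%%' if c == '%' else c)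
--             i += 1
--     return ''.join(out)
-- ===== Notes on version B (the rewrite author's own statement) =====
-- stated objective: faster
-- what changed: B replaces A's per-position startswith scan over the 25-entry _FORMAT_MAP and repeated fmt=fmt[k:] re-slicing with a single index-based pass that counts the maximal run of the leading character once and indexes a per-character output table by min(run, table length), consuming the whole run at once; quote/escape/literal handling is unchanged.
import Mathlib
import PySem

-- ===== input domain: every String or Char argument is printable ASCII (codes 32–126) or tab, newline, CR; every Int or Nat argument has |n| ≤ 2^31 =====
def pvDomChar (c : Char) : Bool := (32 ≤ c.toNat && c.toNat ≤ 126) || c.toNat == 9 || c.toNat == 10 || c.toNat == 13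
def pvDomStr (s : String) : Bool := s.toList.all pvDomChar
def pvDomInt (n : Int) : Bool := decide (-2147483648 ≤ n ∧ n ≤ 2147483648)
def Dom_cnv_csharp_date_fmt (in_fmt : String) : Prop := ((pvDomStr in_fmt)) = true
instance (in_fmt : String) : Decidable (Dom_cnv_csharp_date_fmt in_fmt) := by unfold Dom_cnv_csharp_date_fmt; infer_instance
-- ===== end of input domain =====

-- B replaces A's 25-entry startswith scan and per-step string re-slicing by one index-based
-- pass with run-length counting over a per-character table (objective: faster; same return value).

-- ===== PORT A =====

-- '%' -> '%%' on literal text, Python's s.replace('%', '%%')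
def pvEscPct (l : List Char) : List Char :=
  l.flatMap (fun c => if c = '%' then ['%', '%'] else [c])

-- _FORMAT_MAP, in order
def pvFormatMap : List (List Char × List Char) := [
  (['y','y','y','y'], ['%','Y']), (['y','y','y'], ['%','Y']), (['y','y'], ['%','y']), (['y'], ['%','y']),
  (['M','M','M','M'], ['%','B']), (['M','M','M'], ['%','b']), (['M','M'], ['%','m']), (['M'], ['%','#','m']),
  (['d','d','d','d'], ['%','A']), (['d','d','d'], ['%','a']), (['d','d'], ['%','d']), (['d'], ['%','#','d']),
  (['H','H'], ['%','H']), (['H'], ['%','#','H']), (['h','h'], ['%','I']), (['h'], ['%','#','I']),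
  (['m','m'], ['%','M']), (['m'], ['%','#','M']), (['s','s'], ['%','S']), (['s'], ['%','#','S']),
  (['t','t'], ['%','p']), (['t'], ['%','#','p']), (['z','z','z'], ['%','z']), (['z','z'], ['%','z']), (['z'], ['%','#','z'])]

-- A's inner `for intok, outtok in _FORMAT_MAP: if fmt.startswith(intok)` scan;
-- returns the matched outtok together with len(intok)
def pvFindTok : List (List Char × List Char) → List Char → Option (List Char × Nat)
  | [], _ => none
  | (intok, outtok) :: ms, fmt =>
    if intok.isPrefixOf fmt then some (outtok, intok.length) else pvFindTok ms fmt

-- termination helper for pvGoA: a matched token is nonempty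
theorem pvFindTok_pos : ∀ (ms : List (List Char × List Char)) (fmt o : List Char) (k : Nat),
    (∀ p ∈ ms, 1 ≤ p.1.length) → pvFindTok ms fmt = some (o, k) → 1 ≤ k := by
  intro ms
  induction ms with
  | nil => intro fmt o k _ h; simp [pvFindTok] at h
  | cons p ms ih =>
    intro fmt o k hall h
    obtain ⟨intok, outtok⟩ := p
    simp only [pvFindTok] at h
    by_cases hp : intok.isPrefixOf fmt
    · rw [if_pos hp] at h
      have hk := congrArg Prod.snd (Option.some.inj h)
      simp at hk
      have := hall ⟨intok, outtok⟩ (List.mem_cons_self)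
      simp at this
      omega
    · rw [if_neg hp] at h
      exact ih fmt o k (fun q hq => hall q (List.mem_cons_of_mem _ hq)) h

-- A's while loop over the remaining format string (fmt), accumulating via ++;
-- fmt.find("'",1)/fmt[1:apos]/fmt[apos+1:] are expressed with takeWhile/dropWhile
def pvGoA (fmt : List Char) : List Char :=
  match fmt with
  | [] => []
  | c :: rest =>
    if c = '\'' then
      pvEscPct (rest.takeWhile (· != '\'')) ++ pvGoA ((rest.dropWhile (· != '\'')).drop 1)
    else if c = '\\' then
      pvEscPct (rest.take 1) ++ pvGoA (rest.drop 1)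
    else
      match hk : pvFindTok pvFormatMap (c :: rest) with
      | some (outtok, k) => outtok ++ pvGoA ((c :: rest).drop k)
      | none => pvEscPct [c] ++ pvGoA rest
termination_by fmt.length
decreasing_by
  · have := List.length_dropWhile_le (· != '\'') rest
    simp only [List.length_drop, List.length_cons]
    omega
  · simp only [List.length_drop, List.length_cons]
    omega
  · have h1 := pvFindTok_pos pvFormatMap (c :: rest) outtok k (by decide) hk
    simp only [List.length_drop, List.length_cons]
    omega
  · simp

def cnv_csharp_date_fmt (in_fmt : String) : String := String.mk (pvGoA in_fmt.toList)

-- ===== PORT B =====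

-- B's _TOKENS table: outputs for a run of length k are at index k-1 (k = min(run, len))
def pvTokTable (c : Char) : Option (List (List Char)) :=
  if c = 'y' then some [['%','y'], ['%','y'], ['%','Y'], ['%','Y']]
  else if c = 'M' then some [['%','#','m'], ['%','m'], ['%','b'], ['%','B']]
  else if c = 'd' then some [['%','#','d'], ['%','d'], ['%','a'], ['%','A']]
  else if c = 'H' then some [['%','#','H'], ['%','H']]
  else if c = 'h' then some [['%','#','I'], ['%','I']]
  else if c = 'm' then some [['%','#','M'], ['%','M']]
  else if c = 's' then some [['%','#','S'], ['%','S']]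
  else if c = 't' then some [['%','#','p'], ['%','p']]
  else if c = 'z' then some [['%','#','z'], ['%','z'], ['%','z']]
  else none

-- B's inner `while run: k = min(run, len(toks)); out.append(toks[k-1]); run -= k`
-- (the [] case of a nonzero run is an unreachable totality guard: tables are never empty)
def pvEmitRun : List (List Char) → Nat → List Char
  | _, 0 => []
  | [], _ + 1 => []
  | t :: ts, r + 1 =>
      (t :: ts).getD (min (r + 1) (t :: ts).length - 1) [] ++
        pvEmitRun (t :: ts) (r + 1 - min (r + 1) (t :: ts).length)
termination_by _ r => r
decreasing_by simp only [List.length_cons]; omega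

-- B's main loop: quote/escape branches as in A's source; a table character consumes its
-- whole maximal run at once (run = 1 + length of the following same-character stretch)
def pvGoB (fmt : List Char) : List Char :=
  match fmt with
  | [] => []
  | c :: rest =>
    if c = '\'' then
      pvEscPct (rest.takeWhile (· != '\'')) ++ pvGoB ((rest.dropWhile (· != '\'')).drop 1)
    else if c = '\\' then
      pvEscPct (rest.take 1) ++ pvGoB (rest.drop 1)
    else
      match pvTokTable c with
      | some toks =>
          pvEmitRun toks (1 + (rest.takeWhile (· == c)).length) ++ pvGoB (rest.dropWhile (· == c))
      | none => (if c = '%' then ['%', '%'] else [c]) ++ pvGoB rest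
termination_by fmt.length
decreasing_by
  · have := List.length_dropWhile_le (· != '\'') rest
    simp only [List.length_drop, List.length_cons]
    omega
  · simp only [List.length_drop, List.length_cons]
    omega
  · have := List.length_dropWhile_le (· == c) rest
    simp only [List.length_cons]
    omega
  · simp

def cnv_csharp_date_fmt_alt (in_fmt : String) : String := String.mk (pvGoB in_fmt.toList)

-- ===== PRECONDITION & SPEC =====
def Spec_cnv_csharp_date_fmt (in_fmt : String) (out : String) : Prop := out = cnv_csharp_date_fmt_alt in_fmt
instance (in_fmt : String) (out : String) : Decidable (Spec_cnv_csharp_date_fmt in_fmt out) := by unfold Spec_cnv_csharp_date_fmt; infer_instance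

-- ===== CLAIM (what is proved, stated in full; the proofs are below) =====
def Claim_equal_cnv_csharp_date_fmt : Prop := ∀ (in_fmt : String), Dom_cnv_csharp_date_fmt in_fmt → Spec_cnv_csharp_date_fmt in_fmt (cnv_csharp_date_fmt in_fmt)

-- ===== LEMMAS AND PROOFS =====

-- head of dropWhile does not satisfy the predicate
theorem pvHeadDropWhile (p : Char → Bool) (l : List Char) (x : Char)
    (h : (l.dropWhile p).head? = some x) : p x = false := by
  induction l with
  | nil => simp at h
  | cons a as ih =>
    rw [List.dropWhile_cons] at h
    by_cases hp : p a
    · simp [hp] at h; exact ih h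
    · simp [hp] at h; rw [← h]; exact Bool.eq_false_iff.mpr hp

-- c^k is a prefix of c^r ++ tl (tl not starting with c) iff k ≤ r
theorem pvPrefRep (c : Char) (k : Nat) : ∀ (r : Nat) (tl : List Char), tl.head? ≠ some c →
    (List.replicate k c).isPrefixOf (List.replicate r c ++ tl) = decide (k ≤ r) := by
  induction k with
  | zero => intro r tl _; simp
  | succ k ih =>
    intro r tl h
    cases r with
    | zero =>
      simp only [List.replicate_zero, List.nil_append, List.replicate_succ]
      cases tl with
      | nil => simp
      | cons t ts =>
        simp only [List.head?] at h
        have : (c == t) = false := by simp; intro hc; exact h (by rw [hc])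
        simp [List.isPrefixOf_cons₂, this]
    | succ r =>
      simp only [List.replicate_succ, List.cons_append, List.isPrefixOf_cons₂]
      simp [ih r tl h]

-- what A's token scan returns on a maximal run of a format character, one lemma per character
theorem pvFind_y (r : Nat) (tl : List Char) (h : tl.head? ≠ some 'y') :
    pvFindTok pvFormatMap (List.replicate (r+1) 'y' ++ tl)
      = some (([['%','y'],['%','y'],['%','Y'],['%','Y']] : List (List Char)).getD
          (min (r+1) ([['%','y'],['%','y'],['%','Y'],['%','Y']] : List (List Char)).length - 1) [],
        min (r+1) ([['%','y'],['%','y'],['%','Y'],['%','Y']] : List (List Char)).length) := by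
  have p3 : (['y','y','y'] : List Char).isPrefixOf (List.replicate r 'y' ++ tl) = decide (3 ≤ r) := pvPrefRep 'y' 3 r tl h
  have p2 : (['y','y'] : List Char).isPrefixOf (List.replicate r 'y' ++ tl) = decide (2 ≤ r) := pvPrefRep 'y' 2 r tl h
  have p1 : (['y'] : List Char).isPrefixOf (List.replicate r 'y' ++ tl) = decide (1 ≤ r) := pvPrefRep 'y' 1 r tl h
  rw [List.replicate_succ, List.cons_append]
  simp only [pvFindTok, pvFormatMap, List.isPrefixOf_cons₂, p3, p2, p1, List.isPrefixOf_nil_left]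
  by_cases h3 : 3 ≤ r
  · rw [show min (r+1) ([['%','y'],['%','y'],['%','Y'],['%','Y']] : List (List Char)).length = 4 by simp; omega]
    simp [h3]
  · by_cases h2 : 2 ≤ r
    · rw [show min (r+1) ([['%','y'],['%','y'],['%','Y'],['%','Y']] : List (List Char)).length = 3 by simp; omega]
      simp [h3, h2]
    · by_cases h1 : 1 ≤ r
      · rw [show min (r+1) ([['%','y'],['%','y'],['%','Y'],['%','Y']] : List (List Char)).length = 2 by simp; omega]
        simp [h3, h2, h1]
      · rw [show min (r+1) ([['%','y'],['%','y'],['%','Y'],['%','Y']] : List (List Char)).length = 1 by simp; omega]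
        simp [h3, h2, h1]

theorem pvFind_M (r : Nat) (tl : List Char) (h : tl.head? ≠ some 'M') :
    pvFindTok pvFormatMap (List.replicate (r+1) 'M' ++ tl)
      = some (([['%','#','m'],['%','m'],['%','b'],['%','B']] : List (List Char)).getD (min (r+1) ([['%','#','m'],['%','m'],['%','b'],['%','B']] : List (List Char)).length - 1) [], min (r+1) ([['%','#','m'],['%','m'],['%','b'],['%','B']] : List (List Char)).length) := by
  have p3 : (['M','M','M'] : List Char).isPrefixOf (List.replicate r 'M' ++ tl) = decide (3 ≤ r) := pvPrefRep 'M' 3 r tl h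
  have p2 : (['M','M'] : List Char).isPrefixOf (List.replicate r 'M' ++ tl) = decide (2 ≤ r) := pvPrefRep 'M' 2 r tl h
  have p1 : (['M'] : List Char).isPrefixOf (List.replicate r 'M' ++ tl) = decide (1 ≤ r) := pvPrefRep 'M' 1 r tl h
  rw [List.replicate_succ, List.cons_append]
  simp only [pvFindTok, pvFormatMap, List.isPrefixOf_cons₂, p3, p2, p1, List.isPrefixOf_nil_left]
  by_cases h3 : 3 ≤ r
  · rw [show min (r+1) ([['%','#','m'],['%','m'],['%','b'],['%','B']] : List (List Char)).length = 4 by simp; omega]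
    simp [h3]
  · by_cases h2 : 2 ≤ r
    · rw [show min (r+1) ([['%','#','m'],['%','m'],['%','b'],['%','B']] : List (List Char)).length = 3 by simp; omega]
      simp [h3, h2]
    · by_cases h1 : 1 ≤ r
      · rw [show min (r+1) ([['%','#','m'],['%','m'],['%','b'],['%','B']] : List (List Char)).length = 2 by simp; omega]
        simp [h3, h2, h1]
      · rw [show min (r+1) ([['%','#','m'],['%','m'],['%','b'],['%','B']] : List (List Char)).length = 1 by simp; omega]
        simp [h3, h2, h1]

theorem pvFind_d (r : Nat) (tl : List Char) (h : tl.head? ≠ some 'd') :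
    pvFindTok pvFormatMap (List.replicate (r+1) 'd' ++ tl)
      = some (([['%','#','d'],['%','d'],['%','a'],['%','A']] : List (List Char)).getD (min (r+1) ([['%','#','d'],['%','d'],['%','a'],['%','A']] : List (List Char)).length - 1) [], min (r+1) ([['%','#','d'],['%','d'],['%','a'],['%','A']] : List (List Char)).length) := by
  have p3 : (['d','d','d'] : List Char).isPrefixOf (List.replicate r 'd' ++ tl) = decide (3 ≤ r) := pvPrefRep 'd' 3 r tl h
  have p2 : (['d','d'] : List Char).isPrefixOf (List.replicate r 'd' ++ tl) = decide (2 ≤ r) := pvPrefRep 'd' 2 r tl h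
  have p1 : (['d'] : List Char).isPrefixOf (List.replicate r 'd' ++ tl) = decide (1 ≤ r) := pvPrefRep 'd' 1 r tl h
  rw [List.replicate_succ, List.cons_append]
  simp only [pvFindTok, pvFormatMap, List.isPrefixOf_cons₂, p3, p2, p1, List.isPrefixOf_nil_left]
  by_cases h3 : 3 ≤ r
  · rw [show min (r+1) ([['%','#','d'],['%','d'],['%','a'],['%','A']] : List (List Char)).length = 4 by simp; omega]
    simp [h3]
  · by_cases h2 : 2 ≤ r
    · rw [show min (r+1) ([['%','#','d'],['%','d'],['%','a'],['%','A']] : List (List Char)).length = 3 by simp; omega]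
      simp [h3, h2]
    · by_cases h1 : 1 ≤ r
      · rw [show min (r+1) ([['%','#','d'],['%','d'],['%','a'],['%','A']] : List (List Char)).length = 2 by simp; omega]
        simp [h3, h2, h1]
      · rw [show min (r+1) ([['%','#','d'],['%','d'],['%','a'],['%','A']] : List (List Char)).length = 1 by simp; omega]
        simp [h3, h2, h1]

theorem pvFind_H (r : Nat) (tl : List Char) (h : tl.head? ≠ some 'H') :
    pvFindTok pvFormatMap (List.replicate (r+1) 'H' ++ tl)
      = some (([['%','#','H'],['%','H']] : List (List Char)).getD (min (r+1) ([['%','#','H'],['%','H']] : List (List Char)).length - 1) [], min (r+1) ([['%','#','H'],['%','H']] : List (List Char)).length) := by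
  have p1 : (['H'] : List Char).isPrefixOf (List.replicate r 'H' ++ tl) = decide (1 ≤ r) := pvPrefRep 'H' 1 r tl h
  rw [List.replicate_succ, List.cons_append]
  simp only [pvFindTok, pvFormatMap, List.isPrefixOf_cons₂, p1, List.isPrefixOf_nil_left]
  by_cases h1 : 1 ≤ r
  · rw [show min (r+1) ([['%','#','H'],['%','H']] : List (List Char)).length = 2 by simp; omega]
    simp [h1]
  · rw [show min (r+1) ([['%','#','H'],['%','H']] : List (List Char)).length = 1 by simp; omega]
    simp [h1]

theorem pvFind_h (r : Nat) (tl : List Char) (h : tl.head? ≠ some 'h') :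
    pvFindTok pvFormatMap (List.replicate (r+1) 'h' ++ tl)
      = some (([['%','#','I'],['%','I']] : List (List Char)).getD (min (r+1) ([['%','#','I'],['%','I']] : List (List Char)).length - 1) [], min (r+1) ([['%','#','I'],['%','I']] : List (List Char)).length) := by
  have p1 : (['h'] : List Char).isPrefixOf (List.replicate r 'h' ++ tl) = decide (1 ≤ r) := pvPrefRep 'h' 1 r tl h
  rw [List.replicate_succ, List.cons_append]
  simp only [pvFindTok, pvFormatMap, List.isPrefixOf_cons₂, p1, List.isPrefixOf_nil_left]
  by_cases h1 : 1 ≤ r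
  · rw [show min (r+1) ([['%','#','I'],['%','I']] : List (List Char)).length = 2 by simp; omega]
    simp [h1]
  · rw [show min (r+1) ([['%','#','I'],['%','I']] : List (List Char)).length = 1 by simp; omega]
    simp [h1]

theorem pvFind_m (r : Nat) (tl : List Char) (h : tl.head? ≠ some 'm') :
    pvFindTok pvFormatMap (List.replicate (r+1) 'm' ++ tl)
      = some (([['%','#','M'],['%','M']] : List (List Char)).getD (min (r+1) ([['%','#','M'],['%','M']] : List (List Char)).length - 1) [], min (r+1) ([['%','#','M'],['%','M']] : List (List Char)).length) := by
  have p1 : (['m'] : List Char).isPrefixOf (List.replicate r 'm' ++ tl) = decide (1 ≤ r) := pvPrefRep 'm' 1 r tl h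
  rw [List.replicate_succ, List.cons_append]
  simp only [pvFindTok, pvFormatMap, List.isPrefixOf_cons₂, p1, List.isPrefixOf_nil_left]
  by_cases h1 : 1 ≤ r
  · rw [show min (r+1) ([['%','#','M'],['%','M']] : List (List Char)).length = 2 by simp; omega]
    simp [h1]
  · rw [show min (r+1) ([['%','#','M'],['%','M']] : List (List Char)).length = 1 by simp; omega]
    simp [h1]

theorem pvFind_s (r : Nat) (tl : List Char) (h : tl.head? ≠ some 's') :
    pvFindTok pvFormatMap (List.replicate (r+1) 's' ++ tl)
      = some (([['%','#','S'],['%','S']] : List (List Char)).getD (min (r+1) ([['%','#','S'],['%','S']] : List (List Char)).length - 1) [], min (r+1) ([['%','#','S'],['%','S']] : List (List Char)).length) := by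
  have p1 : (['s'] : List Char).isPrefixOf (List.replicate r 's' ++ tl) = decide (1 ≤ r) := pvPrefRep 's' 1 r tl h
  rw [List.replicate_succ, List.cons_append]
  simp only [pvFindTok, pvFormatMap, List.isPrefixOf_cons₂, p1, List.isPrefixOf_nil_left]
  by_cases h1 : 1 ≤ r
  · rw [show min (r+1) ([['%','#','S'],['%','S']] : List (List Char)).length = 2 by simp; omega]
    simp [h1]
  · rw [show min (r+1) ([['%','#','S'],['%','S']] : List (List Char)).length = 1 by simp; omega]
    simp [h1]

theorem pvFind_t (r : Nat) (tl : List Char) (h : tl.head? ≠ some 't') :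
    pvFindTok pvFormatMap (List.replicate (r+1) 't' ++ tl)
      = some (([['%','#','p'],['%','p']] : List (List Char)).getD (min (r+1) ([['%','#','p'],['%','p']] : List (List Char)).length - 1) [], min (r+1) ([['%','#','p'],['%','p']] : List (List Char)).length) := by
  have p1 : (['t'] : List Char).isPrefixOf (List.replicate r 't' ++ tl) = decide (1 ≤ r) := pvPrefRep 't' 1 r tl h
  rw [List.replicate_succ, List.cons_append]
  simp only [pvFindTok, pvFormatMap, List.isPrefixOf_cons₂, p1, List.isPrefixOf_nil_left]
  by_cases h1 : 1 ≤ r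
  · rw [show min (r+1) ([['%','#','p'],['%','p']] : List (List Char)).length = 2 by simp; omega]
    simp [h1]
  · rw [show min (r+1) ([['%','#','p'],['%','p']] : List (List Char)).length = 1 by simp; omega]
    simp [h1]

theorem pvFind_z (r : Nat) (tl : List Char) (h : tl.head? ≠ some 'z') :
    pvFindTok pvFormatMap (List.replicate (r+1) 'z' ++ tl)
      = some (([['%','#','z'],['%','z'],['%','z']] : List (List Char)).getD (min (r+1) ([['%','#','z'],['%','z'],['%','z']] : List (List Char)).length - 1) [], min (r+1) ([['%','#','z'],['%','z'],['%','z']] : List (List Char)).length) := by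
  have p2 : (['z','z'] : List Char).isPrefixOf (List.replicate r 'z' ++ tl) = decide (2 ≤ r) := pvPrefRep 'z' 2 r tl h
  have p1 : (['z'] : List Char).isPrefixOf (List.replicate r 'z' ++ tl) = decide (1 ≤ r) := pvPrefRep 'z' 1 r tl h
  rw [List.replicate_succ, List.cons_append]
  simp only [pvFindTok, pvFormatMap, List.isPrefixOf_cons₂, p2, p1, List.isPrefixOf_nil_left]
  by_cases h2 : 2 ≤ r
  · rw [show min (r+1) ([['%','#','z'],['%','z'],['%','z']] : List (List Char)).length = 3 by simp; omega]
    simp [h2]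
  · by_cases h1 : 1 ≤ r
    · rw [show min (r+1) ([['%','#','z'],['%','z'],['%','z']] : List (List Char)).length = 2 by simp; omega]
      simp [h2, h1]
    · rw [show min (r+1) ([['%','#','z'],['%','z'],['%','z']] : List (List Char)).length = 1 by simp; omega]
      simp [h2, h1]

-- A's scan finds nothing when the head is not a format character
theorem pvFindTok_FM_none (c : Char) (rest : List Char) (h : pvTokTable c = none) :
    pvFindTok pvFormatMap (c :: rest) = none := by
  have hy : c ≠ 'y' := by intro e; subst e; simp [pvTokTable] at h
  have hM : c ≠ 'M' := by intro e; subst e; simp [pvTokTable] at h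
  have hd : c ≠ 'd' := by intro e; subst e; simp [pvTokTable] at h
  have hH : c ≠ 'H' := by intro e; subst e; simp [pvTokTable] at h
  have hh : c ≠ 'h' := by intro e; subst e; simp [pvTokTable] at h
  have hm : c ≠ 'm' := by intro e; subst e; simp [pvTokTable] at h
  have hs : c ≠ 's' := by intro e; subst e; simp [pvTokTable] at h
  have ht : c ≠ 't' := by intro e; subst e; simp [pvTokTable] at h
  have hz : c ≠ 'z' := by intro e; subst e; simp [pvTokTable] at h
  have by' : ('y' == c) = false := beq_eq_false_iff_ne.mpr (Ne.symm hy)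
  have bM : ('M' == c) = false := beq_eq_false_iff_ne.mpr (Ne.symm hM)
  have bd : ('d' == c) = false := beq_eq_false_iff_ne.mpr (Ne.symm hd)
  have bH : ('H' == c) = false := beq_eq_false_iff_ne.mpr (Ne.symm hH)
  have bh : ('h' == c) = false := beq_eq_false_iff_ne.mpr (Ne.symm hh)
  have bm : ('m' == c) = false := beq_eq_false_iff_ne.mpr (Ne.symm hm)
  have bs : ('s' == c) = false := beq_eq_false_iff_ne.mpr (Ne.symm hs)
  have bt : ('t' == c) = false := beq_eq_false_iff_ne.mpr (Ne.symm ht)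
  have bz : ('z' == c) = false := beq_eq_false_iff_ne.mpr (Ne.symm hz)
  simp [pvFindTok, pvFormatMap, List.isPrefixOf_cons₂, by', bM, bd, bH, bh, bm, bs, bt, bz]

-- A consumes a maximal run of a format character exactly as B's pvEmitRun emits it
theorem pvRunA (c : Char) (T : List (List Char)) (hq : c ≠ '\'') (hb : c ≠ '\\') (hT : T ≠ [])
    (hf : ∀ (r : Nat) (tl : List Char), tl.head? ≠ some c →
      pvFindTok pvFormatMap (List.replicate (r+1) c ++ tl)
        = some (T.getD (min (r+1) T.length - 1) [], min (r+1) T.length)) :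
    ∀ (r : Nat) (tl : List Char), tl.head? ≠ some c →
      pvGoA (List.replicate r c ++ tl) = pvEmitRun T r ++ pvGoA tl := by
  intro r
  induction r using Nat.strong_induction_on with
  | _ r IH =>
    intro tl h
    cases r with
    | zero => simp [pvEmitRun]
    | succ r' =>
      have hf' := hf r' tl h
      rw [List.replicate_succ, List.cons_append] at hf' ⊢
      rw [pvGoA, if_neg hq, if_neg hb]
      split
      · next outtok k heq =>
        rw [heq] at hf'
        have ho := congrArg (·.1) (Option.some.inj hf')
        have hk := congrArg (·.2) (Option.some.inj hf')
        simp only at ho hk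
        obtain ⟨t, ts, rfl⟩ : ∃ t ts, T = t :: ts := by
          cases T with
          | nil => exact absurd rfl hT
          | cons t ts => exact ⟨t, ts, rfl⟩
        have hlen : (1:Nat) ≤ (t :: ts).length := by simp
        have hk1 : 1 ≤ k := by rw [hk]; simp only [List.length_cons]; omega
        have hkle : k ≤ r' + 1 := by rw [hk]; simp only [List.length_cons]; omega
        have hdrop : (c :: (List.replicate r' c ++ tl)).drop k
            = List.replicate (r' + 1 - k) c ++ tl := by
          rw [← List.cons_append, ← List.replicate_succ,
            List.drop_append_of_le_length (by simpa using hkle), List.drop_replicate]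
        rw [hdrop, ho]
        rw [pvEmitRun]
        rw [IH (r' + 1 - k) (by omega) tl h, hk]
        simp [List.append_assoc]
      · next heq =>
        rw [heq] at hf'
        exact absurd hf' (by simp)

-- the maximal same-character run at the head of a list, as replicate ++ rest
theorem pvTakeWhileRep (c : Char) (l : List Char) :
    l.takeWhile (· == c) = List.replicate (l.takeWhile (· == c)).length c := by
  apply List.eq_replicate_of_mem
  intro b hb
  have := List.mem_takeWhile_imp hb
  simpa using this

theorem pvDropWhileHead (c : Char) (l : List Char) :
    (l.dropWhile (· == c)).head? ≠ some c := by
  intro hcon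
  have := pvHeadDropWhile (· == c) l c hcon
  simp at this

-- one step of the equivalence in the format-character case
theorem pvTokStep (n : Nat) (IH : ∀ (l : List Char), l.length ≤ n → pvGoA l = pvGoB l)
    (c : Char) (T : List (List Char)) (rest : List Char) (hlen : rest.length ≤ n)
    (hq : c ≠ '\'') (hb : c ≠ '\\') (ht : pvTokTable c = some T) (hT : T ≠ [])
    (hf : ∀ (r : Nat) (tl : List Char), tl.head? ≠ some c →
      pvFindTok pvFormatMap (List.replicate (r+1) c ++ tl)
        = some (T.getD (min (r+1) T.length - 1) [], min (r+1) T.length)) :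
    pvGoA (c :: rest) = pvGoB (c :: rest) := by
  have hsplit : c :: rest
      = List.replicate ((rest.takeWhile (· == c)).length + 1) c ++ rest.dropWhile (· == c) := by
    rw [List.replicate_succ, List.cons_append, ← pvTakeWhileRep,
      List.takeWhile_append_dropWhile]
  have hhd := pvDropWhileHead c rest
  have hA : pvGoA (c :: rest)
      = pvEmitRun T ((rest.takeWhile (· == c)).length + 1) ++ pvGoA (rest.dropWhile (· == c)) := by
    conv_lhs => rw [hsplit]
    exact pvRunA c T hq hb hT hf _ _ hhd
  have hB : pvGoB (c :: rest)
      = pvEmitRun T (1 + (rest.takeWhile (· == c)).length) ++ pvGoB (rest.dropWhile (· == c)) := by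
    rw [pvGoB, if_neg hq, if_neg hb]
    split
    · next toks heq =>
      rw [ht] at heq
      rw [Option.some.inj heq]
    · next heq => rw [ht] at heq; cases heq
  rw [hA, hB, Nat.add_comm 1]
  congr 1
  exact IH _ (le_trans (List.length_dropWhile_le _ _) hlen)

theorem pvGoA_eq_pvGoB : ∀ (n : Nat) (l : List Char), l.length ≤ n → pvGoA l = pvGoB l := by
  intro n
  induction n with
  | zero =>
    intro l hl
    cases l with
    | nil => simp [pvGoA, pvGoB]
    | cons c rest => simp at hl
  | succ n IH =>
    intro l hl
    cases l with
    | nil => simp [pvGoA, pvGoB]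
    | cons c rest =>
      have hrest : rest.length ≤ n := by simp at hl; omega
      by_cases hq : c = '\''
      · subst hq
        rw [pvGoA, pvGoB, if_pos rfl, if_pos rfl]
        congr 1
        refine IH _ ?_
        have h1 := List.length_dropWhile_le (· != '\'') rest
        simp only [List.length_drop]
        omega
      · by_cases hb : c = '\\'
        · subst hb
          rw [pvGoA, pvGoB, if_neg hq, if_neg hq, if_pos rfl, if_pos rfl]
          congr 1
          refine IH _ ?_
          simp only [List.length_drop]
          omega
        · rcases ht : pvTokTable c with _ | T
          · -- not a format character: both emit one escaped literal character
            rw [pvGoA, pvGoB, if_neg hq, if_neg hq, if_neg hb, if_neg hb]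
            split
            · next outtok k heq => rw [pvFindTok_FM_none c rest ht] at heq; cases heq
            · next =>
              split
              · next toks heq2 => rw [ht] at heq2; cases heq2
              · next =>
                have he : pvEscPct [c] = (if c = '%' then ['%','%'] else [c]) := by
                  simp [pvEscPct]
                rw [he, IH rest hrest]
          · -- format character: dispatch on which one
            have hvals : c = 'y' ∨ c = 'M' ∨ c = 'd' ∨ c = 'H' ∨ c = 'h' ∨ c = 'm' ∨ c = 's' ∨ c = 't' ∨ c = 'z' := by
              unfold pvTokTable at ht
              split_ifs at ht with h1 h2 h3 h4 h5 h6 h7 h8 h9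
              · exact Or.inl h1
              · exact Or.inr (Or.inl h2)
              · exact Or.inr (Or.inr (Or.inl h3))
              · exact Or.inr (Or.inr (Or.inr (Or.inl h4)))
              · exact Or.inr (Or.inr (Or.inr (Or.inr (Or.inl h5))))
              · exact Or.inr (Or.inr (Or.inr (Or.inr (Or.inr (Or.inl h6)))))
              · exact Or.inr (Or.inr (Or.inr (Or.inr (Or.inr (Or.inr (Or.inl h7))))))
              · exact Or.inr (Or.inr (Or.inr (Or.inr (Or.inr (Or.inr (Or.inr (Or.inl h8)))))))
              · exact Or.inr (Or.inr (Or.inr (Or.inr (Or.inr (Or.inr (Or.inr (Or.inr h9)))))))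
            rcases hvals with rfl | rfl | rfl | rfl | rfl | rfl | rfl | rfl | rfl
            · have hTeq : [['%','y'], ['%','y'], ['%','Y'], ['%','Y']] = T := by simpa [pvTokTable] using ht
              subst hTeq
              exact pvTokStep n IH 'y' _ rest hrest (by decide) (by decide) (by simp [pvTokTable]) (by simp) pvFind_y
            · have hTeq : [['%','#','m'], ['%','m'], ['%','b'], ['%','B']] = T := by simpa [pvTokTable] using ht
              subst hTeq
              exact pvTokStep n IH 'M' _ rest hrest (by decide) (by decide) (by simp [pvTokTable]) (by simp) pvFind_M
            · have hTeq : [['%','#','d'], ['%','d'], ['%','a'], ['%','A']] = T := by simpa [pvTokTable] using ht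
              subst hTeq
              exact pvTokStep n IH 'd' _ rest hrest (by decide) (by decide) (by simp [pvTokTable]) (by simp) pvFind_d
            · have hTeq : [['%','#','H'], ['%','H']] = T := by simpa [pvTokTable] using ht
              subst hTeq
              exact pvTokStep n IH 'H' _ rest hrest (by decide) (by decide) (by simp [pvTokTable]) (by simp) pvFind_H
            · have hTeq : [['%','#','I'], ['%','I']] = T := by simpa [pvTokTable] using ht
              subst hTeq
              exact pvTokStep n IH 'h' _ rest hrest (by decide) (by decide) (by simp [pvTokTable]) (by simp) pvFind_h
            · have hTeq : [['%','#','M'], ['%','M']] = T := by simpa [pvTokTable] using ht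
              subst hTeq
              exact pvTokStep n IH 'm' _ rest hrest (by decide) (by decide) (by simp [pvTokTable]) (by simp) pvFind_m
            · have hTeq : [['%','#','S'], ['%','S']] = T := by simpa [pvTokTable] using ht
              subst hTeq
              exact pvTokStep n IH 's' _ rest hrest (by decide) (by decide) (by simp [pvTokTable]) (by simp) pvFind_s
            · have hTeq : [['%','#','p'], ['%','p']] = T := by simpa [pvTokTable] using ht
              subst hTeq
              exact pvTokStep n IH 't' _ rest hrest (by decide) (by decide) (by simp [pvTokTable]) (by simp) pvFind_t
            · have hTeq : [['%','#','z'], ['%','z'], ['%','z']] = T := by simpa [pvTokTable] using ht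
              subst hTeq
              exact pvTokStep n IH 'z' _ rest hrest (by decide) (by decide) (by simp [pvTokTable]) (by simp) pvFind_z


-- ===== VERDICT (by name: the statement is the Claim_ definition above) =====
theorem cnv_csharp_date_fmt_spec : Claim_equal_cnv_csharp_date_fmt := by
  intro s _
  unfold Spec_cnv_csharp_date_fmt cnv_csharp_date_fmt cnv_csharp_date_fmt_alt
  rw [pvGoA_eq_pvGoB s.toList.length s.toList le_rfl]
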